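-- pv_equiv track=rewrite | github.com/CalHenry/pretty-print-languagetool | src/pp_languagetool/helpers.py | build_offset_to_line_col_map
-- ===== SOURCE A (Python) =====
-- def build_offset_to_line_col_map(text: str) -> dict:
--     """Build a mapping from character offset to (line, column) position.
--
--     Args:
--         text: The input text
--
--     Returns:
--         A dict with offset as key and (line, col) tuple as value
--     """
--     offset_map = {}
--     line = 1
--     col = 1
--
--     for offset, char in enumerate(text):
--         offset_map[offset] = (line, col)
--         if char == "\n":
--             line += 1
--             col = 1
--         else:
--             col += 1
--
--     # Add one more entry for the position right after the last character
--     offset_map[len(text)] = (line, col)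
--
--     return offset_map
-- ===== SOURCE B (Python) =====
-- def build_offset_to_line_col_map(text: str) -> dict:
--     """Build a mapping from character offset to (line, column) position.
--
--     Line numbers come from the index of the line in text.split("\n") instead of
--     a counter mutated on every newline character.
--     """
--     offset_map = {}
--     lines = text.split("\n")
--     offset = 0
--     for line_num, line in enumerate(lines, 1):
--         for col, _ch in enumerate(line, 1):
--             offset_map[offset] = (line_num, col)
--             offset += 1
--         if line_num < len(lines):
--             # the separating newline itself
--             offset_map[offset] = (line_num, len(line) + 1)
--             offset += 1
--     # position right after the last character
--     offset_map[len(text)] = (len(lines), len(lines[-1]) + 1)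
--     return offset_map
-- ===== Notes on version B (the rewrite author's own statement) =====
-- stated objective: alternative
-- what changed: B splits the text on ' ' once and derives each offset's line number from the line's index in the split (nested loops per line, with a closed-form final entry), instead of A's single character loop mutating line/col counters on every ' '.
import Mathlib
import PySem

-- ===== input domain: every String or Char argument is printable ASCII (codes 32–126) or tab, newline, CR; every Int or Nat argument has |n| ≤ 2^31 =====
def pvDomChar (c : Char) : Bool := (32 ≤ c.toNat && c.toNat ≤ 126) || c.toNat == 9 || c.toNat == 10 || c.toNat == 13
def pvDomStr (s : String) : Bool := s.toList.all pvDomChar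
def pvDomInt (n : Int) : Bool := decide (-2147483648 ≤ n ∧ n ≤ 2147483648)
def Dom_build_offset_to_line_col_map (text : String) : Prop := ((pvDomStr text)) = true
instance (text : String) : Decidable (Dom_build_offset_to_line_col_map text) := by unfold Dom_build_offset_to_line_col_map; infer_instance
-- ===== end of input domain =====

-- B derives each offset's line number from the index of its line in text.split("\n")
-- (nested loops over the split lines) instead of A's per-character line/col counter; same cost, different decomposition.

-- ===== PORT A =====
-- loop body of A's `for offset, char in enumerate(text)` (state: offset_map, line, col)
def pvStepA (s : PySem.Dict Int (Int × Int) × Int × Int) (p : Int × Char) :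
    PySem.Dict Int (Int × Int) × Int × Int :=
  let m := s.1.insert p.1 (s.2.1, s.2.2)
  if p.2 == '\n' then (m, s.2.1 + 1, 1) else (m, s.2.1, s.2.2 + 1)

def build_offset_to_line_col_map (text : String) : List (Int × Int × Int) :=
  let cs := text.toList
  let s := (PySem.List.enumerate cs).foldl pvStepA (PySem.Dict.empty, 1, 1)
  -- offset_map[len(text)] = (line, col)
  (s.1.insert (cs.length : Int) (s.2.1, s.2.2)).items

-- ===== PORT B =====
-- inner loop body: `for col, _ch in enumerate(line, 1)` (state: offset_map, offset)
def pvStepRow (line_num : Int) (t : PySem.Dict Int (Int × Int) × Int) (q : Int × Char) :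
    PySem.Dict Int (Int × Int) × Int :=
  (t.1.insert t.2 (line_num, q.1), t.2 + 1)

-- outer loop body: one line plus (when not last) its separating newline
def pvStepB (nlines : Int) (s : PySem.Dict Int (Int × Int) × Int) (p : Int × List Char) :
    PySem.Dict Int (Int × Int) × Int :=
  let s2 := (PySem.List.enumerate p.2 1).foldl (pvStepRow p.1) s
  if p.1 < nlines then (s2.1.insert s2.2 (p.1, (p.2.length : Int) + 1), s2.2 + 1) else s2

def build_offset_to_line_col_map_alt (text : String) : List (Int × Int × Int) :=
  let cs := text.toList
  let lines := PySem.Chars.splitOn cs ['\n']        -- text.split("\n")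
  let s := (PySem.List.enumerate lines 1).foldl (pvStepB (lines.length : Int))
            (PySem.Dict.empty, 0)
  let last := (PySem.List.pyGet? lines (-1)).getD []  -- lines[-1]; split never returns [], so pyGet? is some
  (s.1.insert (cs.length : Int) ((lines.length : Int), (last.length : Int) + 1)).items

-- ===== PRECONDITION & SPEC =====
def Spec_build_offset_to_line_col_map (text : String) (out : List (Int × Int × Int)) : Prop := out = build_offset_to_line_col_map_alt text
instance (text : String) (out : List (Int × Int × Int)) : Decidable (Spec_build_offset_to_line_col_map text out) := by unfold Spec_build_offset_to_line_col_map; infer_instance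

-- ===== CLAIM (what is proved, stated in full; the proofs are below) =====
def Claim_equal_build_offset_to_line_col_map : Prop := ∀ (text : String), Dom_build_offset_to_line_col_map text → Spec_build_offset_to_line_col_map text (build_offset_to_line_col_map text)

-- ===== LEMMAS AND PROOFS =====

def pvSplitNL : List Char → List (List Char)
  | [] => [[]]
  | c :: cs =>
    if c = '\n' then [] :: pvSplitNL cs
    else
      match pvSplitNL cs with
      | [] => [[c]]
      | p :: ps => (c :: p) :: ps

def pvJoinNL : List (List Char) → List Char
  | [] => []
  | [l] => l
  | l :: ls => l ++ '\n' :: pvJoinNL ls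

def pvSpecA : List Char → Int → Int → Int → List (Int × Int × Int)
  | [], off, line, col => [(off, line, col)]
  | c :: cs, off, line, col =>
    (off, line, col) :: (if c = '\n' then pvSpecA cs (off + 1) (line + 1) 1
                         else pvSpecA cs (off + 1) line (col + 1))

def pvRowB : List Char → Int → Int → Int → List (Int × Int × Int)
  | [], _, _, _ => []
  | _ :: l, off, line, col => (off, line, col) :: pvRowB l (off + 1) line (col + 1)

def pvSpecB : List (List Char) → Int → Int → List (Int × Int × Int)
  | [], _, _ => []
  | [l], off, line => pvRowB l off line 1
  | l :: l' :: ls, off, line =>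
      pvRowB l off line 1 ++ (off + l.length, line, (l.length : Int) + 1) ::
        pvSpecB (l' :: ls) (off + l.length + 1) (line + 1)

lemma pvSplitNL_ne_nil (cs : List Char) : pvSplitNL cs ≠ [] := by
  induction cs with
  | nil => simp [pvSplitNL]
  | cons c cs ih =>
    simp only [pvSplitNL]
    split
    · simp
    · rcases h : pvSplitNL cs with _ | ⟨p, ps⟩
      · exact absurd h ih
      · simp

lemma pvSplitOn_go_eq (fuel : Nat) (l cur : List Char) (acc : List (List Char))
    (h : l.length ≤ fuel) :
    PySem.Chars.splitOn.go ['\n'] fuel l cur acc =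
      acc.reverse ++ (match pvSplitNL l with
        | [] => []
        | p :: ps => (cur.reverse ++ p) :: ps) := by
  induction fuel generalizing l cur acc with
  | zero =>
    interval_cases hl : l.length
    rw [List.length_eq_zero_iff] at hl
    subst hl
    simp [PySem.Chars.splitOn.go, pvSplitNL]
  | succ fuel ih =>
    rcases l with _ | ⟨c, rest⟩
    · simp [PySem.Chars.splitOn.go, pvSplitNL]
    · rw [PySem.Chars.splitOn.go]
      by_cases hc : c = '\n'
      · subst hc
        simp only [List.isPrefixOf, BEq.rfl, List.isPrefixOf_nil_left, Bool.and_self, if_pos,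
          List.length_cons, List.drop_succ_cons, List.drop_zero]
        rw [show List.drop ([] : List Char).length rest = rest from rfl,
          ih rest [] (cur.reverse :: acc) (by simpa using Nat.le_of_succ_le_succ (by simpa using h))]
        simp only [pvSplitNL, if_pos rfl]
        rcases hs : pvSplitNL rest with _ | ⟨p, ps⟩ <;> simp
      · have hpre : List.isPrefixOf ['\n'] (c :: rest) = false := by
          simp [List.isPrefixOf]; intro hh; exact absurd hh.symm hc
        rw [hpre]
        simp only [Bool.false_eq_true, if_false]
        rw [ih rest (c :: cur) acc (by simpa using Nat.le_of_succ_le_succ (by simpa using h))]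
        simp only [pvSplitNL, if_neg hc]
        rcases hs : pvSplitNL rest with _ | ⟨p, ps⟩
        · exact absurd hs (pvSplitNL_ne_nil rest)
        · simp

lemma pvSplitOn_eq (cs : List Char) : PySem.Chars.splitOn cs ['\n'] = pvSplitNL cs := by
  rw [PySem.Chars.splitOn, pvSplitOn_go_eq cs.length.succ cs [] [] (Nat.le_succ _)]
  rcases hs : pvSplitNL cs with _ | ⟨p, ps⟩
  · exact absurd hs (pvSplitNL_ne_nil cs)
  · simp

lemma pvJoin_split (cs : List Char) : pvJoinNL (pvSplitNL cs) = cs := by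
  induction cs with
  | nil => simp [pvSplitNL, pvJoinNL]
  | cons c cs ih =>
    simp only [pvSplitNL]
    by_cases hc : c = '\n'
    · subst hc
      rw [if_pos rfl]
      rcases h : pvSplitNL cs with _ | ⟨p, ps⟩
      · exact absurd h (pvSplitNL_ne_nil cs)
      · rw [← ih, h]
        rcases ps with _ | ⟨q, qs⟩
        · rfl
        · rw [pvJoinNL, pvJoinNL] <;> simp
    · rw [if_neg hc]
      rcases h : pvSplitNL cs with _ | ⟨p, ps⟩
      · exact absurd h (pvSplitNL_ne_nil cs)
      · rcases ps with _ | ⟨q, qs⟩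
        · rw [pvJoinNL]
          rw [h] at ih; rw [pvJoinNL] at ih; rw [ih]
        · rw [pvJoinNL]
          · rw [h] at ih; rw [pvJoinNL] at ih
            · simp only [List.cons_append, ih]
            · simp
          · simp

lemma pvSplit_no_nl (cs : List Char) : ∀ l ∈ pvSplitNL cs, '\n' ∉ l := by
  induction cs with
  | nil => simp [pvSplitNL]
  | cons c cs ih =>
    simp only [pvSplitNL]
    by_cases hc : c = '\n'
    · subst hc; rw [if_pos rfl]
      intro l hl
      rcases List.mem_cons.mp hl with h | h
      · subst h; simp
      · exact ih l h
    · rw [if_neg hc]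
      rcases h : pvSplitNL cs with _ | ⟨p, ps⟩
      · exact absurd h (pvSplitNL_ne_nil cs)
      · intro l hl
        rcases List.mem_cons.mp hl with h' | h'
        · subst h'
          intro hm
          rcases List.mem_cons.mp hm with h'' | h''
          · exact hc h''.symm
          · exact ih p (h ▸ List.mem_cons_self) h''
        · exact ih l (h ▸ List.mem_cons_of_mem _ h')

lemma pvSpecA_len (cs : List Char) (off line col : Int) :
    (pvSpecA cs off line col).length = cs.length + 1 := by
  induction cs generalizing off line col with
  | nil => simp [pvSpecA]
  | cons c cs ih =>
    simp only [pvSpecA]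
    split <;> simp [ih]

lemma pvSpecA_block (l : List Char) (rest : List Char) (off line col : Int)
    (hl : '\n' ∉ l) :
    pvSpecA (l ++ rest) off line col =
      pvRowB l off line col ++ pvSpecA rest (off + l.length) line (col + l.length) := by
  induction l generalizing off col with
  | nil => simp [pvRowB]
  | cons c l ih =>
    have hc : ¬ c = '\n' := fun h => hl (h ▸ List.mem_cons_self)
    have hl' : '\n' ∉ l := fun h => hl (List.mem_cons_of_mem _ h)
    simp only [List.cons_append, pvSpecA, if_neg hc, pvRowB]
    rw [ih (off + 1) (col + 1) hl']
    simp only [List.length_cons, List.cons_append]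
    push_cast
    ring_nf

lemma pvMain (L : List (List Char)) (hL : L ≠ []) (hnl : ∀ l ∈ L, '\n' ∉ l)
    (off line : Int) :
    pvSpecA (pvJoinNL L) off line 1 =
      pvSpecB L off line ++
        [(off + ((pvJoinNL L).length : Int), line + (L.length : Int) - 1,
          ((L.getLast hL).length : Int) + 1)] := by
  induction L generalizing off line with
  | nil => exact absurd rfl hL
  | cons l ls ih =>
    rcases ls with _ | ⟨l', ls⟩
    · have hb := pvSpecA_block l [] off line 1 (hnl l List.mem_cons_self)
      simp only [List.append_nil] at hb
      simp only [pvJoinNL, pvSpecB, hb, pvSpecA]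
      simp only [List.length_cons, List.length_nil, List.getLast_singleton]
      refine congrArg _ ?_
      simp only [List.cons.injEq, Prod.mk.injEq, and_true]
      push_cast
      exact ⟨trivial, by omega, by omega⟩
    · have hne : (l' :: ls) ≠ [] := by simp
      rw [show pvJoinNL (l :: l' :: ls) = l ++ '\n' :: pvJoinNL (l' :: ls) from rfl]
      rw [pvSpecA_block l _ off line 1 (hnl l List.mem_cons_self)]
      rw [show pvSpecA ('\n' :: pvJoinNL (l' :: ls)) (off + (l.length : Int)) line (1 + (l.length : Int))
            = (off + (l.length : Int), line, 1 + (l.length : Int)) ::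
              pvSpecA (pvJoinNL (l' :: ls)) (off + (l.length : Int) + 1) (line + 1) 1 by
        simp [pvSpecA]]
      rw [ih hne (fun x hx => hnl x (List.mem_cons_of_mem _ hx)) (off + (l.length : Int) + 1) (line + 1)]
      rw [show pvSpecB (l :: l' :: ls) off line = pvRowB l off line 1 ++
            (off + (l.length : Int), line, (l.length : Int) + 1) ::
            pvSpecB (l' :: ls) (off + (l.length : Int) + 1) (line + 1) from rfl]
      rw [show (l :: l' :: ls).getLast hL = (l' :: ls).getLast hne from rfl]
      have h1 : (off + (l.length : Int), line, 1 + (l.length : Int))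
          = (off + (l.length : Int), line, (l.length : Int) + 1) := by
        rw [add_comm 1]
      have h2 : (off + (l.length : Int) + 1 + ((pvJoinNL (l' :: ls)).length : Int),
            line + 1 + ((l' :: ls).length : Int) - 1,
            (((l' :: ls).getLast hne).length : Int) + 1)
          = (off + (((l ++ '\n' :: pvJoinNL (l' :: ls)) : List Char).length : Int),
            line + ((l :: l' :: ls).length : Int) - 1,
            (((l' :: ls).getLast hne).length : Int) + 1) := by
        simp only [Prod.mk.injEq, and_true]
        push_cast [List.length_append, List.length_cons]
        omega
      rw [h1, h2]
      simp [List.append_assoc, List.cons_append]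

lemma pvFresh (d : PySem.Dict Int (Int × Int)) (k : Int)
    (hd : ∀ j ∈ d.keys, j < k) : d.contains k = false := by
  by_cases h : d.contains k = true
  · exact absurd (hd k ((PySem.Dict.contains_iff_mem_keys d k).mp h)) (lt_irrefl k)
  · simpa using h

lemma pvRowB_len (l : List Char) (off line col : Int) :
    (pvRowB l off line col).length = l.length := by
  induction l generalizing off col with
  | nil => simp [pvRowB]
  | cons c l ih => simp [pvRowB, ih]

lemma pvA_fold (cs : List Char) (off line col : Int) (d : PySem.Dict Int (Int × Int))
    (hd : ∀ j ∈ d.keys, j < off) :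
    (((PySem.List.enumerate cs off).foldl pvStepA (d, line, col)).1.insert
        (off + (cs.length : Int))
        (((PySem.List.enumerate cs off).foldl pvStepA (d, line, col)).2.1,
         ((PySem.List.enumerate cs off).foldl pvStepA (d, line, col)).2.2)).items =
      d.items ++ pvSpecA cs off line col := by
  induction cs generalizing off line col d with
  | nil =>
    simp only [PySem.List.enumerate, List.foldl_nil, List.length_nil, Nat.cast_zero,
      add_zero, pvSpecA]
    rw [PySem.Dict.items_insert_of_not_contains d _ (pvFresh d off hd)]
  | cons c cs ih =>
    rw [PySem.List.enumerate.eq_2]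
    simp only [List.foldl_cons]
    have hlen : off + ((c :: cs).length : Int) = (off + 1) + (cs.length : Int) := by
      simp only [List.length_cons]; push_cast; omega
    rw [hlen]
    have hd' : ∀ j ∈ (d.insert off (line, col)).keys, j < off + 1 := by
      intro j hj
      rw [PySem.Dict.mem_keys_insert] at hj
      rcases hj with h | h
      · omega
      · exact lt_trans (hd j h) (by omega)
    have hitems : (d.insert off (line, col)).items = d.items ++ [(off, line, col)] :=
      PySem.Dict.items_insert_of_not_contains d _ (pvFresh d off hd)
    by_cases hc : c = '\n'
    · subst hc
      rw [show pvStepA (d, line, col) (off, '\n')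
            = (d.insert off (line, col), line + 1, 1) from rfl]
      rw [ih (off + 1) (line + 1) 1 _ hd']
      simp [pvSpecA, hitems]
    · have hbeq : (c == '\n') = false := by simpa using hc
      rw [show pvStepA (d, line, col) (off, c)
            = (d.insert off (line, col), line, col + 1) by
        simp [pvStepA, hbeq]]
      rw [ih (off + 1) line (col + 1) _ hd']
      simp [pvSpecA, if_neg hc, hitems]

lemma pvRow_fold (l : List Char) (line off col : Int) (d : PySem.Dict Int (Int × Int))
    (hd : ∀ j ∈ d.keys, j < off) :
    ((PySem.List.enumerate l col).foldl (pvStepRow line) (d, off)).1.items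
        = d.items ++ pvRowB l off line col ∧
    ((PySem.List.enumerate l col).foldl (pvStepRow line) (d, off)).2 = off + (l.length : Int) ∧
    (∀ j ∈ ((PySem.List.enumerate l col).foldl (pvStepRow line) (d, off)).1.keys,
      j < ((PySem.List.enumerate l col).foldl (pvStepRow line) (d, off)).2) := by
  induction l generalizing off col d with
  | nil =>
    simp only [PySem.List.enumerate, List.foldl_nil, List.length_nil, Nat.cast_zero,
      add_zero, pvRowB, List.append_nil]
    exact ⟨by simp, by simp, hd⟩
  | cons c l ih =>
    rw [PySem.List.enumerate.eq_2]
    simp only [List.foldl_cons]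
    rw [show pvStepRow line (d, off) (col, c) = (d.insert off (line, col), off + 1) from rfl]
    have hd' : ∀ j ∈ (d.insert off (line, col)).keys, j < off + 1 := by
      intro j hj
      rw [PySem.Dict.mem_keys_insert] at hj
      rcases hj with h | h
      · omega
      · exact lt_trans (hd j h) (by omega)
    obtain ⟨h1, h2, h3⟩ := ih (off + 1) (col + 1) _ hd'
    refine ⟨?_, by rw [h2]; simp only [List.length_cons]; push_cast; omega, h3⟩
    rw [h1, PySem.Dict.items_insert_of_not_contains d _ (pvFresh d off hd)]
    simp [pvRowB]

lemma pvB_fold (ls : List (List Char)) (N : Int) (k off : Int) (d : PySem.Dict Int (Int × Int))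
    (hd : ∀ j ∈ d.keys, j < off) (h : k + (ls.length : Int) - 1 = N) :
    ((PySem.List.enumerate ls k).foldl (pvStepB N) (d, off)).1.items
        = d.items ++ pvSpecB ls off k ∧
    ((PySem.List.enumerate ls k).foldl (pvStepB N) (d, off)).2
        = off + ((pvSpecB ls off k).length : Int) ∧
    (∀ j ∈ ((PySem.List.enumerate ls k).foldl (pvStepB N) (d, off)).1.keys,
      j < ((PySem.List.enumerate ls k).foldl (pvStepB N) (d, off)).2) := by
  induction ls generalizing k off d with
  | nil =>
    simp only [PySem.List.enumerate, List.foldl_nil, pvSpecB]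
    exact ⟨by simp, by simp, hd⟩
  | cons l ls ih =>
    rw [PySem.List.enumerate.eq_2]
    simp only [List.foldl_cons]
    obtain ⟨r1, r2, r3⟩ := pvRow_fold l k off 1 d hd
    rcases ls with _ | ⟨l', ls⟩
    · have hcond : ¬ (k < N) := by
        simp only [List.length_cons, List.length_nil] at h; push_cast at h; omega
      rw [show pvStepB N (d, off) (k, l)
            = (PySem.List.enumerate l 1).foldl (pvStepRow k) (d, off) by
        simp only [pvStepB, if_neg hcond]]
      rw [show PySem.List.enumerate ([] : List (List Char)) (k + 1) = [] from rfl,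
        List.foldl_nil]
      refine ⟨by rw [r1]; rfl, ?_, r3⟩
      rw [r2]
      have : (pvSpecB [l] off k).length = l.length := by
        simp [pvSpecB, pvRowB_len]
      rw [this]
    · have hcond : k < N := by
        simp only [List.length_cons] at h; push_cast at h; omega
      rw [show pvStepB N (d, off) (k, l)
            = (((PySem.List.enumerate l 1).foldl (pvStepRow k) (d, off)).1.insert
                 ((PySem.List.enumerate l 1).foldl (pvStepRow k) (d, off)).2
                 (k, (l.length : Int) + 1),
               ((PySem.List.enumerate l 1).foldl (pvStepRow k) (d, off)).2 + 1) by
        simp only [pvStepB, if_pos hcond]]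
      rw [r2]
      have hitems2 : (((PySem.List.enumerate l 1).foldl (pvStepRow k) (d, off)).1.insert
            (off + (l.length : Int)) (k, (l.length : Int) + 1)).items
          = d.items ++ pvRowB l off k 1 ++ [(off + (l.length : Int), k, (l.length : Int) + 1)] := by
        rw [PySem.Dict.items_insert_of_not_contains _ _
          (pvFresh _ _ (fun j hj => by have := r3 j hj; omega)), r1]
      have hkeys2 : ∀ j ∈ (((PySem.List.enumerate l 1).foldl (pvStepRow k) (d, off)).1.insert
            (off + (l.length : Int)) (k, (l.length : Int) + 1)).keys,
          j < off + (l.length : Int) + 1 := by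
        intro j hj
        rw [PySem.Dict.mem_keys_insert] at hj
        rcases hj with h' | h'
        · omega
        · have := r3 j h'; omega
      have h' : (k + 1) + ((l' :: ls).length : Int) - 1 = N := by
        simp only [List.length_cons] at h ⊢; push_cast at h ⊢; omega
      obtain ⟨i1, i2, i3⟩ := ih (k + 1) (off + (l.length : Int) + 1) _ hkeys2 h'
      refine ⟨?_, ?_, i3⟩
      · rw [i1, hitems2]
        rw [show pvSpecB (l :: l' :: ls) off k = pvRowB l off k 1 ++
              (off + (l.length : Int), k, (l.length : Int) + 1) ::
              pvSpecB (l' :: ls) (off + (l.length : Int) + 1) (k + 1) from rfl]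
        simp [List.append_assoc]
      · rw [i2]
        rw [show pvSpecB (l :: l' :: ls) off k = pvRowB l off k 1 ++
              (off + (l.length : Int), k, (l.length : Int) + 1) ::
              pvSpecB (l' :: ls) (off + (l.length : Int) + 1) (k + 1) from rfl]
        simp only [List.length_append, List.length_cons, pvRowB_len]
        push_cast
        ring

lemma pvLast (xs : List (List Char)) (hne : xs ≠ []) :
    (PySem.List.pyGet? xs (-1)).getD [] = xs.getLast hne := by
  have hl : 1 ≤ xs.length := List.length_pos_iff.mpr hne
  simp [PySem.List.pyGet?, PySem.List.pyIdx?]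
  rw [if_pos hl]
  rw [Option.bind_some, List.getElem?_eq_getElem (by omega)]
  simp [List.getLast_eq_getElem]

-- ===== VERDICT (by name: the statement is the Claim_ definition above) =====
theorem build_offset_to_line_col_map_spec : Claim_equal_build_offset_to_line_col_map := by
  intro text _
  unfold Spec_build_offset_to_line_col_map build_offset_to_line_col_map build_offset_to_line_col_map_alt
  simp only [pvSplitOn_eq]
  have hne : pvSplitNL text.toList ≠ [] := pvSplitNL_ne_nil text.toList
  -- A's loop emits pvSpecA
  have hA := pvA_fold text.toList 0 1 1 PySem.Dict.empty (by simp [PySem.Dict.keys_empty])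
  rw [zero_add] at hA
  -- the main combinatorial identity
  have hmain := pvMain (pvSplitNL text.toList) hne (pvSplit_no_nl text.toList) 0 1
  rw [pvJoin_split] at hmain
  have hlen : ((pvSpecB (pvSplitNL text.toList) 0 1).length : Int) = (text.toList.length : Int) := by
    have hc := congrArg List.length hmain
    rw [pvSpecA_len] at hc
    simp only [List.length_append, List.length_cons, List.length_nil] at hc
    omega
  -- B's loop emits pvSpecB
  obtain ⟨b1, b2, b3⟩ := pvB_fold (pvSplitNL text.toList) ((pvSplitNL text.toList).length : Int)
      1 0 PySem.Dict.empty (by simp [PySem.Dict.keys_empty]) (by push_cast; ring)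
  rw [zero_add, hlen] at b2
  -- B's final insert is at a fresh key
  have hBitems : (((PySem.List.enumerate (pvSplitNL text.toList) 1).foldl
        (pvStepB ((pvSplitNL text.toList).length : Int)) (PySem.Dict.empty, 0)).1.insert
        (text.toList.length : Int)
        (((pvSplitNL text.toList).length : Int),
         ((((PySem.List.pyGet? (pvSplitNL text.toList) (-1)).getD []).length : Int) + 1))).items
      = pvSpecB (pvSplitNL text.toList) 0 1 ++
        [((text.toList.length : Int), ((pvSplitNL text.toList).length : Int),
          (((pvSplitNL text.toList).getLast hne).length : Int) + 1)] := by
    rw [PySem.Dict.items_insert_of_not_contains _ _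
      (pvFresh _ _ (fun j hj => by have := b3 j hj; omega)), b1, pvLast _ hne,
      show PySem.Dict.empty.items = ([] : List (Int × Int × Int)) from rfl]
    simp
  rw [hA, hBitems, hmain,
    show PySem.Dict.empty.items = ([] : List (Int × Int × Int)) from rfl]
  simp only [List.nil_append]
  congr 1
  simp only [List.cons.injEq, Prod.mk.injEq, and_true]
  omega
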